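-- pv_equiv track=rewrite | github.com/ersozekrem/flight-price-tracker | src/working_flight_scraper.py | extract_price
-- ===== SOURCE A (Python) =====
-- def extract_price(text):
--     """Extract price from text"""
--     if '$' in text:
--         # Find the dollar sign
--         start = text.find('$')
--         # Extract until space or newline
--         end = start + 1
--         while end < len(text) and text[end].isdigit():
--             end += 1
--         return text[start:end]
--     return "N/A"
-- ===== SOURCE B (Python) =====
-- import re
--
-- def extract_price(text):
--     """Extract price from text"""
--     m = re.search(r'\$\d*', text)
--     return m.group() if m else "N/A"
-- ===== Notes on version B (the rewrite author's own statement) =====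
-- stated objective: idiomatic
-- what changed: Replaces the membership test + find + manual index while-loop + slice with a single regex search for \$\d* whose match (or absence) directly yields the result.
import Mathlib
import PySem

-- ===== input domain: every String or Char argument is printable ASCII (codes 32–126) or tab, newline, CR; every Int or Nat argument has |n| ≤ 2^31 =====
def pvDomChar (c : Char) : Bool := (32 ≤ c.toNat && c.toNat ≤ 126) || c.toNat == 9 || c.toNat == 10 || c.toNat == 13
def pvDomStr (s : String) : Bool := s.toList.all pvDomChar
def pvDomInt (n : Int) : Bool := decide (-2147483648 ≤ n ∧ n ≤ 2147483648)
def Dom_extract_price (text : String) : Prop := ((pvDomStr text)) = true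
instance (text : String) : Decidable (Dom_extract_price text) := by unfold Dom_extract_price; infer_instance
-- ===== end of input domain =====

-- B replaces A's membership test + find + manual index loop + slice with a single
-- regex-style first-match scan for '$' followed by digits (idiomatic; no speed claim).


-- ===== PORT A =====
-- while end < len(text) and text[end].isdigit(): end += 1
def pvAEnd (s : List Char) (e : Nat) : Nat :=
  if h : e < s.length then
    if PySem.Chars.isdigit s[e] then pvAEnd s (e + 1) else e
  else e
termination_by s.length - e

def extract_price (text : String) : String :=
  if PySem.Str.isIn "$" text then
    let start := PySem.Str.find text "$"
    let e := pvAEnd text.toList (start.toNat + 1)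
    PySem.Str.slice text (some start) (some (e : Int))
  else "N/A"

-- ===== PORT B =====
-- re.search(r'\$\d*', text): first '$' together with the maximal digit run after it
def pvBSearch (cs : List Char) : Option (List Char) :=
  match cs with
  | [] => none
  | c :: rest =>
      if c = '$' then some (c :: rest.takeWhile PySem.Chars.isdigit)
      else pvBSearch rest

def extract_price_alt (text : String) : String :=
  match pvBSearch text.toList with
  | some m => String.ofList m
  | none => "N/A"

-- ===== PRECONDITION & SPEC =====
def Spec_extract_price (text : String) (out : String) : Prop := out = extract_price_alt text
instance (text : String) (out : String) : Decidable (Spec_extract_price text out) := by unfold Spec_extract_price; infer_instance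

-- ===== CLAIM (what is proved, stated in full; the proofs are below) =====
def Claim_equal_extract_price : Prop := ∀ (text : String), Dom_extract_price text → Spec_extract_price text (extract_price text)

-- ===== LEMMAS AND PROOFS =====

theorem pvAEnd_eq (s : List Char) (e : Nat) :
    pvAEnd s e = e + ((s.drop e).takeWhile PySem.Chars.isdigit).length := by
  fun_induction pvAEnd s e with
  | case1 e h hd ih =>
      rw [ih, List.drop_eq_getElem_cons h, List.takeWhile_cons, if_pos hd]
      simp; omega
  | case2 e h hd =>
      rw [List.drop_eq_getElem_cons h, List.takeWhile_cons, if_neg hd]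
      simp
  | case3 e h =>
      rw [List.drop_eq_nil_of_le (by omega)]
      simp

theorem pvBSearch_eq_none (s : List Char) (h : '$' ∉ s) : pvBSearch s = none := by
  induction s with
  | nil => rfl
  | cons c t ih =>
      simp only [List.mem_cons, not_or] at h
      simp [pvBSearch, Ne.symm h.1, ih h.2]

theorem pvBSearch_of_first (s : List Char) (i : Nat)
    (hmin : ∀ j < i, ¬ (['$'] <+: s.drop j)) (h : ['$'] <+: s.drop i) :
    pvBSearch s = some ('$' :: (s.drop (i + 1)).takeWhile PySem.Chars.isdigit) := by
  induction s generalizing i with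
  | nil => simp at h
  | cons c t ih =>
      cases i with
      | zero =>
          simp only [List.drop_zero] at h
          obtain ⟨r, hr⟩ := h
          cases hr
          simp [pvBSearch]
      | succ j =>
          have hc : c ≠ '$' := by
            intro hc
            exact hmin 0 (Nat.succ_pos j) ⟨t, by simp [hc]⟩
          simp only [List.drop_succ_cons] at h ⊢
          simp only [pvBSearch, if_neg hc]
          exact ih j (fun k hk => by simpa using hmin (k + 1) (by omega)) h

theorem extract_price_spec : Claim_equal_extract_price := by
  intro text _
  unfold Spec_extract_price extract_price extract_price_alt
  by_cases hin : PySem.Str.isIn "$" text = true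
  · rw [if_pos hin]
    have hinf : ['$'] <:+: text.toList := by
      have := (PySem.Str.isIn_iff_infix "$" text).mp hin
      simpa using this
    have hpos : 0 ≤ PySem.Chars.find text.toList ['$'] :=
      (PySem.Chars.find_nonneg_iff text.toList ['$']).mpr hinf
    obtain ⟨hpre, hmin⟩ := PySem.Chars.find_spec hpos
    set i : Nat := (PySem.Chars.find text.toList ['$']).toNat with hi
    have hfind : PySem.Str.find text "$" = (i : Int) := by
      simp [hi]; omega
    obtain ⟨r, hr⟩ := hpre
    have h1 : text.toList.drop i = '$' :: r := by simpa using hr.symm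
    have h2 : text.toList.drop (i + 1) = r := by
      have := congrArg (List.drop 1) h1
      simpa [List.drop_drop, Nat.add_comm] using this
    have hdrop : text.toList.drop i = '$' :: text.toList.drop (i + 1) := by
      rw [h1, h2]
    have hB := pvBSearch_of_first text.toList i hmin ⟨r, hr⟩
    rw [hB]
    set tw := (text.toList.drop (i + 1)).takeWhile PySem.Chars.isdigit with htw
    have he : pvAEnd text.toList (i + 1) = i + 1 + tw.length := pvAEnd_eq _ _
    apply String.toList_inj.mp
    rw [hfind]
    simp only [PySem.Str.toList_slice, PySem.Chars.slice_eq_listSlice]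
    rw [PySem.List.slice_toNat _ (by omega) (by positivity)]
    simp only [Int.toNat_natCast]
    rw [he, hdrop]
    have harith : i + 1 + tw.length - i = tw.length + 1 := by omega
    rw [harith, List.take_succ_cons]
    have : (text.toList.drop (i + 1)).take tw.length = tw :=
      (List.prefix_iff_eq_take.mp (List.takeWhile_prefix _)).symm
    simp [this]
  · rw [if_neg hin]
    have hnot : '$' ∉ text.toList := by
      intro hmem
      exact hin ((PySem.Str.isIn_iff_infix "$" text).mpr
        (by simpa using (List.singleton_infix_iff '$' text.toList).mpr hmem))
    rw [pvBSearch_eq_none text.toList hnot]
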